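-- pv_equiv track=rewrite | github.com/rafael-sant-ana/motor-de-busca-python | testes-de-implementacao/query-parser-mateus.py | tokenize
-- ===== SOURCE A (Python) =====
-- def tokenize(query):
--     tokens = []
--     i = 0
--     n = len(query)
--
--     while i < n:
--         char = query[i]
--
--         if char.isspace():
--             i += 1
--             continue
--
--         if char in '()':
--             tokens.append(char)
--             i += 1
--             continue
--
--         if char.isalpha():
--             start = i
--
--             while i < n and (query[i].isalpha() or query[i] == '_'):
--                 i += 1
--
--             word = query[start:i].upper()
--
--             if word in ['AND', 'OR']:
--                 tokens.append(word)
--             else: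
--                 tokens.append(word)
--             continue
--
--         i += 1
--
--     return tokens
-- ===== SOURCE B (Python) =====
-- def tokenize(query):
--     # Single-pass state machine: accumulate a word buffer, flush it when a
--     # non-word character arrives; parentheses are emitted as their own tokens.
--     tokens = []
--     buf = []
--     for char in query:
--         if char.isalpha():
--             buf.append(char)
--         elif buf and char == '_':
--             buf.append(char)
--         else:
--             if buf:
--                 tokens.append(''.join(buf).upper())
--                 buf = []
--             if char in '()':
--                 tokens.append(char)
--     if buf:
--         tokens.append(''.join(buf).upper())
--     return tokens
-- ===== Notes on version B (the rewrite author's own statement) =====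
-- stated objective: simpler
-- what changed: Replaced A's index-based while loop with a nested word-scanning while loop and slicing by a single left fold over the characters that maintains a word buffer and flushes it when a non-word character (or the end) is reached.
import Mathlib
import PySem

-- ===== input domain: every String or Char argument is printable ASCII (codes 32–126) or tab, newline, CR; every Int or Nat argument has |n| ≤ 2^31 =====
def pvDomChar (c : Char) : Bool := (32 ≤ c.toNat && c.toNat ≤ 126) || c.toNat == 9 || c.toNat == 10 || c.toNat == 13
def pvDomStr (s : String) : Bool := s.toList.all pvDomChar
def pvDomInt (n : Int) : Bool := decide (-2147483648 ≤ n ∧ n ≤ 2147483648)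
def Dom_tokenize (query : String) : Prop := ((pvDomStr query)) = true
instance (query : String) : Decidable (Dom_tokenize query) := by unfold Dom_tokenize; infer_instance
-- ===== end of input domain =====

-- B replaces A's index-based scan (with an inner word-scanning while loop) by a single
-- left fold over the characters that maintains a word buffer and flushes it on word ends
-- (objective: simpler one-pass decomposition, same cost).

-- ===== PORT A =====
-- inner while loop of A: consume letters/underscores, return (word-part, rest)
def pvScanWord : List Char → List Char × List Char
  | [] => ([], [])
  | c :: cs =>
    if PySem.Chars.isalpha c || c == '_' then
      let p := pvScanWord cs
      (c :: p.1, p.2)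
    else ([], c :: cs)

theorem pvScanWord_snd_le (cs : List Char) : (pvScanWord cs).2.length ≤ cs.length := by
  induction cs with
  | nil => simp [pvScanWord]
  | cons c cs ih =>
    simp only [pvScanWord]
    split
    · exact Nat.le_succ_of_le ih
    · simp

-- outer while loop of A
def pvTokA : List Char → List String
  | [] => []
  | c :: cs =>
    if PySem.Chars.isspace c then pvTokA cs
    else if c == '(' || c == ')' then String.ofList [c] :: pvTokA cs
    else if PySem.Chars.isalpha c then
      let word := String.ofList (PySem.Chars.upper (c :: (pvScanWord cs).1))
      (if word ∈ (["AND", "OR"] : List String) then word else word) :: pvTokA (pvScanWord cs).2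
    else pvTokA cs
termination_by cs => cs.length
decreasing_by
  · simp
  · simp
  · exact Nat.lt_succ_of_le (pvScanWord_snd_le cs)
  · simp

def tokenize (query : String) : List String := pvTokA query.toList

-- ===== PORT B =====
-- one fold step of B's state machine; state = (tokens so far, current word buffer)
def pvStep (s : List String × List Char) (c : Char) : List String × List Char :=
  if PySem.Chars.isalpha c then (s.1, s.2 ++ [c])
  else if !s.2.isEmpty && c == '_' then (s.1, s.2 ++ [c])
  else
    let toks := if s.2.isEmpty then s.1 else s.1 ++ [String.ofList (PySem.Chars.upper s.2)]
    if c == '(' || c == ')' then (toks ++ [String.ofList [c]], []) else (toks, [])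

-- final flush of B
def pvFlush (s : List String × List Char) : List String :=
  if s.2.isEmpty then s.1 else s.1 ++ [String.ofList (PySem.Chars.upper s.2)]

def tokenize_alt (query : String) : List String :=
  pvFlush (query.toList.foldl pvStep ([], []))

-- ===== PRECONDITION & SPEC =====
def Spec_tokenize (query : String) (out : List String) : Prop := out = tokenize_alt query
instance (query : String) (out : List String) : Decidable (Spec_tokenize query out) := by unfold Spec_tokenize; infer_instance

-- ===== CLAIM (what is proved, stated in full; the proofs are below) =====
def Claim_equal_tokenize : Prop := ∀ (query : String), Dom_tokenize query → Spec_tokenize query (tokenize query)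

-- ===== LEMMAS AND PROOFS =====

theorem pv_alpha_char {c : Char} (h : PySem.Chars.isalpha c = true) :
    PySem.Chars.isspace c = false ∧ (c == '(') = false ∧ (c == ')') = false := by
  have eA : ('A').val.toNat = 65 := rfl
  have eZ : ('Z').val.toNat = 90 := rfl
  have ea : ('a').val.toNat = 97 := rfl
  have ez : ('z').val.toNat = 122 := rfl
  simp only [PySem.Chars.isalpha, PySem.Chars.isupper, PySem.Chars.islower,
    Bool.or_eq_true, Bool.and_eq_true, decide_eq_true_eq, Char.le_def,
    UInt32.le_iff_toNat_le, eA, eZ, ea, ez] at h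
  refine ⟨?_, ?_, ?_⟩
  · simp only [PySem.Chars.isspace]
    simp only [Bool.or_eq_false_iff, Bool.and_eq_false_iff, decide_eq_false_iff_not, not_le]
    have : c.toNat = c.val.toNat := rfl
    omega
  · simp only [beq_eq_false_iff_ne, ne_eq]
    rintro rfl
    simp at h
  · simp only [beq_eq_false_iff_ne, ne_eq]
    rintro rfl
    simp at h

theorem pv_space_char {c : Char} (h : PySem.Chars.isspace c = true) :
    (c == '(') = false ∧ (c == ')') = false ∧ (c == '_') = false := by
  simp only [PySem.Chars.isspace, Bool.or_eq_true, Bool.and_eq_true, decide_eq_true_eq] at h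
  refine ⟨?_, ?_, ?_⟩ <;>
  · simp only [beq_eq_false_iff_ne, ne_eq]
    rintro rfl
    simp at h

theorem pv_main : ∀ (n : Nat) (cs : List Char), cs.length ≤ n →
    (∀ toks, pvFlush (cs.foldl pvStep (toks, [])) = toks ++ pvTokA cs) ∧
    (∀ toks buf, buf ≠ [] →
      pvFlush (cs.foldl pvStep (toks, buf)) =
        toks ++ String.ofList (PySem.Chars.upper (buf ++ (pvScanWord cs).1)) :: pvTokA (pvScanWord cs).2) := by
  intro n
  induction n with
  | zero =>
    intro cs hlen
    have hnil : cs = [] := List.eq_nil_of_length_eq_zero (Nat.le_zero.mp hlen)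
    subst hnil
    constructor
    · intro toks; simp [pvFlush, pvTokA]
    · intro toks buf hbuf
      simp [pvFlush, pvScanWord, pvTokA, List.isEmpty_iff, hbuf]
  | succ n ih =>
    intro cs hlen
    cases cs with
    | nil =>
      constructor
      · intro toks; simp [pvFlush, pvTokA]
      · intro toks buf hbuf
        simp [pvFlush, pvScanWord, pvTokA, List.isEmpty_iff, hbuf]
    | cons c cs =>
      have hcs : cs.length ≤ n := by simpa using hlen
      obtain ⟨ih1, ih2⟩ := ih cs hcs
      constructor
      · intro toks
        simp only [List.foldl_cons]
        by_cases ha : PySem.Chars.isalpha c = true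
        · obtain ⟨hs, hp1, hp2⟩ := pv_alpha_char ha
          rw [show pvStep (toks, []) c = (toks, [c]) from by simp [pvStep, ha]]
          rw [ih2 toks [c] (by simp)]
          simp [pvTokA, hs, hp1, hp2, ha, pvScanWord]
        · by_cases hs : PySem.Chars.isspace c = true
          · obtain ⟨hp1, hp2, hu⟩ := pv_space_char hs
            rw [show pvStep (toks, []) c = (toks, []) from by simp [pvStep, ha, hp1, hp2, hu]]
            rw [ih1 toks]
            simp [pvTokA, hs]
          · by_cases hp : (c == '(' || c == ')') = true
            · rw [show pvStep (toks, []) c = (toks ++ [String.ofList [c]], []) from by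
                simp [pvStep, ha, hp]]
              rw [ih1]
              simp [pvTokA, hs, hp]
            · rw [show pvStep (toks, []) c = (toks, []) from by simp [pvStep, ha, hp]]
              rw [ih1 toks]
              simp only [Bool.or_eq_true, not_or] at hp
              simp [pvTokA, hs, ha, hp.1, hp.2]
      · intro toks buf hbuf
        have hne : buf.isEmpty = false := by simp [hbuf]
        simp only [List.foldl_cons]
        by_cases ha : PySem.Chars.isalpha c = true
        · rw [show pvStep (toks, buf) c = (toks, buf ++ [c]) from by simp [pvStep, ha]]
          rw [ih2 toks (buf ++ [c]) (by simp)]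
          simp [pvScanWord, ha, List.append_assoc]
        · by_cases hu : (c == '_') = true
          · rw [show pvStep (toks, buf) c = (toks, buf ++ [c]) from by
              simp [pvStep, ha, hne, hu]]
            rw [ih2 toks (buf ++ [c]) (by simp)]
            simp [pvScanWord, ha, hu, List.append_assoc]
          · have hscan : pvScanWord (c :: cs) = ([], c :: cs) := by
              simp [pvScanWord, ha, hu]
            rw [hscan]
            by_cases hs : PySem.Chars.isspace c = true
            · obtain ⟨hp1, hp2, _⟩ := pv_space_char hs
              rw [show pvStep (toks, buf) c =
                  (toks ++ [String.ofList (PySem.Chars.upper buf)], []) from by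
                simp [pvStep, ha, hne, hu, hp1, hp2]]
              rw [ih1]
              simp [pvTokA, hs]
            · by_cases hp : (c == '(' || c == ')') = true
              · rw [show pvStep (toks, buf) c =
                    (toks ++ [String.ofList (PySem.Chars.upper buf)] ++ [String.ofList [c]], []) from by
                  simp [pvStep, ha, hne, hu, hp]]
                rw [ih1]
                simp [pvTokA, hs, hp]
              · rw [show pvStep (toks, buf) c =
                    (toks ++ [String.ofList (PySem.Chars.upper buf)], []) from by
                  simp [pvStep, ha, hne, hu, hp]]
                rw [ih1]
                simp only [Bool.or_eq_true, not_or] at hp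
                simp [pvTokA, hs, ha, hp.1, hp.2]

-- ===== VERDICT (by name: the statement is the Claim_ definition above) =====
theorem tokenize_spec : Claim_equal_tokenize := by
  intro query _
  unfold Spec_tokenize tokenize tokenize_alt
  exact ((pv_main query.toList.length query.toList le_rfl).1 []).symm
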